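-- pv_equiv track=rewrite | github.com/qiuyusong/work-skill-tools | skills/ecp-timereport-autofill/scripts/fill_timereport.py | extract_existing_descriptions
-- ===== SOURCE A (Python) =====
-- from typing import Any
--
-- def clean_string(value: Any) -> str | None:
--     if value is None:
--         return None
--     text = str(value).strip()
--     return text or None
--
-- def extract_existing_descriptions(details: list[dict[str, Any]]) -> set[str]:
--     descriptions: set[str] = set()
--
--     def walk(node: Any) -> None:
--         if isinstance(node, dict):
--             for key, value in node.items():
--                 if key in {"WorkDescription", "workDescription", "description"}:
--                     text = clean_string(value)
--                     if text:
--                         descriptions.add(text)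
--                 walk(value)
--         elif isinstance(node, list):
--             for item in node:
--                 walk(item)
--
--     walk(details)
--     return descriptions
-- ===== SOURCE B (Python) =====
-- KEYS = {"WorkDescription", "workDescription", "description"}
--
-- def extract_existing_descriptions(details):
--     # One flat pass: within the given domain (list of dicts with string values)
--     # the original's recursion into values is a no-op, so a comprehension suffices.
--     cleaned = (str(value).strip()
--                for row in details
--                for key, value in row.items()
--                if key in KEYS)
--     return {text for text in cleaned if text}
-- ===== Notes on version B (the rewrite author's own statement) =====
-- stated objective: simpler
-- what changed: Replaces the nested recursive walk with accumulator mutation by a single flat generator/set comprehension over the dicts' items (recursion into string values is a no-op on this domain).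
import Mathlib
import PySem

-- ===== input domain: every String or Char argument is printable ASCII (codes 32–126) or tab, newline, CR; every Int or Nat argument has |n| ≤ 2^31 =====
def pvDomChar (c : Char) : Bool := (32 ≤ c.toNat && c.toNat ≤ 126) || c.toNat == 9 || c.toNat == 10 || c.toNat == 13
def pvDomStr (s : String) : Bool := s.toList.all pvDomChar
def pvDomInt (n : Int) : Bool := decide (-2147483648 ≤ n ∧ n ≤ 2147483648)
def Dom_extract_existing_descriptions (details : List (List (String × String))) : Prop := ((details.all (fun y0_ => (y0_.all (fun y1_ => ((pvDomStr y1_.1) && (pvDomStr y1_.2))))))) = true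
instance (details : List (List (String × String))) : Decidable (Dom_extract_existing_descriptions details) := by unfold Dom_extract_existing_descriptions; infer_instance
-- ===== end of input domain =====

-- B replaces A's nested recursive walk (mutating a shared set) by one flat
-- set comprehension over the dicts' items; on this domain (string values)
-- A's recursion into values is a no-op, so the results coincide (simpler).

-- ===== PORT A =====
-- the key set {"WorkDescription","workDescription","description"}
def pvKeys : List String := ["WorkDescription", "workDescription", "description"]

-- walk(details): details is a list of dicts whose values are strings, so the
-- recursive calls walk(value) on strings do nothing; each dict contributes its
-- matching cleaned values to the accumulated set, in iteration order.
def extract_existing_descriptions (details : List (List (String × String))) : List String :=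
  details.foldl
    (fun descriptions row =>
      (PySem.Dict.ofList row).items.foldl
        (fun descriptions kv =>
          if kv.1 ∈ pvKeys then
            -- text = clean_string(value); if text: descriptions.add(text)
            let text := PySem.Str.strip kv.2
            if text = "" then descriptions else PySem.Set.add descriptions text
          else descriptions)
        descriptions)
    PySem.Set.empty

-- ===== PORT B =====
-- cleaned = (str(value).strip() for row in details for key, value in row.items() if key in KEYS)
def pvCleaned (details : List (List (String × String))) : List String :=
  details.flatMap (fun row =>
    (PySem.Dict.ofList row).items.filterMap (fun kv =>
      if kv.1 ∈ pvKeys then some (PySem.Str.strip kv.2) else none))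

-- return {text for text in cleaned if text}
def extract_existing_descriptions_alt (details : List (List (String × String))) : List String :=
  PySem.Set.ofList ((pvCleaned details).filter (fun text => text ≠ ""))

-- ===== PRECONDITION & SPEC =====
def Spec_extract_existing_descriptions (details : List (List (String × String))) (out : List String) : Prop := out = extract_existing_descriptions_alt details
instance (details : List (List (String × String))) (out : List String) : Decidable (Spec_extract_existing_descriptions details out) := by unfold Spec_extract_existing_descriptions; infer_instance

-- ===== CLAIM (what is proved, stated in full; the proofs are below) =====
def Claim_equal_extract_existing_descriptions : Prop := ∀ (details : List (List (String × String))), Dom_extract_existing_descriptions details → Spec_extract_existing_descriptions details (extract_existing_descriptions details)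

-- ===== LEMMAS AND PROOFS =====

-- A's inner loop over one dict's items = folding Set.add over the matched,
-- cleaned, non-empty strings of that dict.
theorem pv_inner (l : List (String × String)) (s : PySem.Set String) :
    l.foldl
      (fun descriptions kv =>
        if kv.1 ∈ pvKeys then
          let text := PySem.Str.strip kv.2
          if text = "" then descriptions else PySem.Set.add descriptions text
        else descriptions) s
    = ((l.filterMap (fun kv =>
          if kv.1 ∈ pvKeys then some (PySem.Str.strip kv.2) else none)).filter
        (fun text => text ≠ "")).foldl PySem.Set.add s := by
  induction l generalizing s with
  | nil => rfl
  | cons kv rest ih =>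
      rw [List.foldl_cons, List.filterMap_cons]
      by_cases hk : kv.1 ∈ pvKeys
      · by_cases ht : PySem.Str.strip kv.2 = ""
        · simp only [hk, if_true, ht, List.filter_cons, decide_not,
            decide_true, Bool.not_true, Bool.false_eq_true, if_false]
          simpa only [decide_not] using ih s
        · simp only [hk, if_true, ht, List.filter_cons, decide_not,
            decide_false, Bool.not_false, if_true, List.foldl_cons]
          simpa only [decide_not] using ih (PySem.Set.add s (PySem.Str.strip kv.2))
      · simp only [hk, if_false]
        exact ih s

-- A's outer loop = folding Set.add over the concatenation of all dicts' contributions.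
theorem pv_outer (details : List (List (String × String))) (s : PySem.Set String) :
    details.foldl
      (fun descriptions row =>
        (PySem.Dict.ofList row).items.foldl
          (fun descriptions kv =>
            if kv.1 ∈ pvKeys then
              let text := PySem.Str.strip kv.2
              if text = "" then descriptions else PySem.Set.add descriptions text
            else descriptions) descriptions) s
    = ((pvCleaned details).filter (fun text => text ≠ "")).foldl PySem.Set.add s := by
  induction details generalizing s with
  | nil => rfl
  | cons row rest ih =>
      rw [List.foldl_cons, ih, pv_inner]
      simp only [pvCleaned, List.flatMap_cons, List.filter_append, List.foldl_append]

-- ===== VERDICT (by name: the statement is the Claim_ definition above) =====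
theorem extract_existing_descriptions_spec : Claim_equal_extract_existing_descriptions := by
  intro details _
  show extract_existing_descriptions details = extract_existing_descriptions_alt details
  rw [extract_existing_descriptions, extract_existing_descriptions_alt,
    PySem.Set.ofList_eq_foldl, pv_outer]
  rfl
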